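-- pv_equiv track=rewrite | github.com/YashB63/GFG-Daily-Questions | Day 101/Largest number in one swap/largest_number_in_one_swap.py | LargestSwap
-- ===== SOURCE A (Python) =====
-- def LargestSwap(S):
--
--     i=0
--     arr = list(S)
--
--     while i < len(arr):
--
--         max_ = max(arr[i:])
--         newarr = ''.join(arr[i:])
--         ind = i + newarr.rfind(max_)
--
--         if arr[i] != max_:
--             arr[i], arr[ind] = arr[ind], arr[i]
--             return ''. join(arr)
--
--         i = i + 1
--
--     return S
-- ===== SOURCE B (Python) =====
-- def LargestSwap(S):
--     s = list(S)
--     n = len(s)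
--     if n == 0:
--         return S
--     # backward pass: suf[i] = index of the rightmost maximum of s[i:]
--     best = n - 1
--     suf = [0] * n
--     for i in range(n - 1, -1, -1):
--         if s[i] > s[best]:
--             best = i
--         suf[i] = best
--     # forward pass: first position not already holding its suffix maximum
--     for i in range(n):
--         j = suf[i]
--         if s[i] != s[j]:
--             s[i], s[j] = s[j], s[i]
--             return ''.join(s)
--     return S
-- ===== Notes on version B (the rewrite author's own statement) =====
-- stated objective: faster
-- what changed: A recomputes max(arr[i:]) and an rfind over the suffix at every loop position (quadratic); B precomputes each position's rightmost-suffix-maximum index in one backward pass and then does a single forward scan to the first mismatch and one swap.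
import Mathlib
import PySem

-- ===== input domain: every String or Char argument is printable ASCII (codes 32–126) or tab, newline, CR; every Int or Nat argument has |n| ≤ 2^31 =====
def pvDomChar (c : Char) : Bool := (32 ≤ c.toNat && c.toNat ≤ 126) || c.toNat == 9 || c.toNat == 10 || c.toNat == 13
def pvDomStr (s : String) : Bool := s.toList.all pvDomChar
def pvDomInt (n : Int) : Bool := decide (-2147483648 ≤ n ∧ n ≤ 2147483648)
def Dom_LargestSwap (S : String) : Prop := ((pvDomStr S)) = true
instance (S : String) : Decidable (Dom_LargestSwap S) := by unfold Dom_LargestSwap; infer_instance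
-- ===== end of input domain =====

-- B replaces A's per-position recomputation of max(arr[i:]) and rfind (quadratic scans)
-- by one backward pass precomputing each position's rightmost-suffix-max index plus a
-- single forward scan to the first mismatch (objective: faster).

-- ===== PORT A =====
-- A's while-loop as recursion on i (decreasing arr.length - i).  arr[i:] with i ≥ 0 is
-- List.drop i (exact); max(...) is PySem.List.max?; ''.join of a char list is
-- String.ofList; .rfind is PySem.Str.rfind; the simultaneous swap assignment reads both
-- old values first, exactly as Python does.
def LargestSwapLoop (S : String) (arr : List Char) (i : Nat) : String :=
  if _h : i < arr.length then
    let suf := arr.drop i                                    -- arr[i:]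
    match PySem.List.max? suf (fun c => c) with              -- max_ = max(arr[i:])
    | none => S                                              -- unreachable: suf ≠ [] since i < len (Python max would raise only on [])
    | some m =>
      let newarr := String.ofList suf                        -- newarr = ''.join(arr[i:])
      let ind : Int := (i : Int) + PySem.Str.rfind newarr (String.ofList [m])
      if (arr.getD i ' ') ≠ m then                           -- arr[i] != max_  (i in range)
        let t := (PySem.List.pyGetD arr ind ' ', PySem.List.pyGetD arr (i : Int) ' ')
        let arr1 := PySem.List.pySetD arr (i : Int) t.1
        let arr2 := PySem.List.pySetD arr1 ind t.2
        String.ofList arr2                                   -- ''.join(arr)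
      else LargestSwapLoop S arr (i + 1)
  else S
termination_by arr.length - i

def LargestSwap (S : String) : String :=
  LargestSwapLoop S S.toList 0

-- ===== PORT B =====
-- forward pass of Source B: walk the precomputed suffix-max-index list, first mismatch swaps
def altFwd (S : String) (s : List Char) : List Nat → Nat → String
  | [], _ => S
  | j :: rest, i =>
    if s.getD i ' ' ≠ s.getD j ' ' then
      let t := (s.getD j ' ', s.getD i ' ')
      String.ofList ((s.set i t.1).set j t.2)
    else altFwd S s rest (i + 1)

def LargestSwap_alt (S : String) : String :=
  let s := S.toList
  let n := s.length
  if n = 0 then S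
  else
    -- backward pass: suf[i] = index of the rightmost maximum of s[i:]
    -- (List.foldr over range n processes i = n-1 down to 0, as Source B's backward loop does)
    let bs := (List.range n).foldr
      (fun i acc =>
        let best := if s.getD acc.1 ' ' < s.getD i ' ' then i else acc.1
        (best, best :: acc.2)) (n - 1, ([] : List Nat))
    altFwd S s bs.2 0

-- ===== PRECONDITION & SPEC =====
def Spec_LargestSwap (S : String) (out : String) : Prop := out = LargestSwap_alt S
instance (S : String) (out : String) : Decidable (Spec_LargestSwap S out) := by unfold Spec_LargestSwap; infer_instance

-- ===== CLAIM (what is proved, stated in full; the proofs are below) =====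
def Claim_equal_LargestSwap : Prop := ∀ (S : String), Dom_LargestSwap S → Spec_LargestSwap S (LargestSwap S)

-- ===== LEMMAS AND PROOFS =====

-- maximum char of a nonempty list (Python's running-max loop shape)
def maxC : List Char → Char
  | [] => ' '
  | x :: t => t.foldl max x

-- index of the RIGHTMOST occurrence of the maximum
def rmax : List Char → Nat
  | [] => 0
  | [_] => 0
  | x :: y :: t => if maxC (y :: t) < x then 0 else rmax (y :: t) + 1

-- absolute rightmost-suffix-max index at position i
def fidx (s : List Char) (i : Nat) : Nat := i + rmax (s.drop i)

theorem foldl_max_comm (a b : Char) (l : List Char) :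
    l.foldl max (max a b) = max a (l.foldl max b) := by
  induction l generalizing b with
  | nil => rfl
  | cons c l ih => simp only [List.foldl]; rw [max_assoc]; exact ih (max b c)

theorem maxC_cons (x y : Char) (t : List Char) :
    maxC (x :: y :: t) = max x (maxC (y :: t)) := by
  simp only [maxC, List.foldl]
  exact foldl_max_comm x y t

theorem le_maxC (l : List Char) (y : Char) (hy : y ∈ l) : y ≤ maxC l := by
  cases l with
  | nil => cases hy
  | cons x t =>
    rcases List.mem_cons.mp hy with h | h
    · subst h; exact (PySem.List.le_foldl_max t y).1
    · exact (PySem.List.le_foldl_max t x).2 y h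

theorem rmax_lt (l : List Char) (h : l ≠ []) : rmax l < l.length := by
  induction l with
  | nil => exact absurd rfl h
  | cons x t ih =>
    cases t with
    | nil => simp [rmax]
    | cons y t' =>
      simp only [rmax]
      split
      · simp
      · have := ih (by simp)
        simpa using Nat.succ_lt_succ this

theorem getD_rmax (l : List Char) (h : l ≠ []) : l.getD (rmax l) ' ' = maxC l := by
  induction l with
  | nil => exact absurd rfl h
  | cons x t ih =>
    cases t with
    | nil => simp [rmax, maxC]
    | cons y t' =>
      rw [maxC_cons]
      simp only [rmax]
      split
      · rename_i hlt
        simp [max_eq_left (le_of_lt hlt)]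
      · rename_i hge
        have hx : x ≤ maxC (y :: t') := le_of_not_gt hge
        rw [max_eq_right hx]
        simpa using ih (by simp)

theorem getD_gt_rmax (l : List Char) (k : Nat) (h1 : rmax l < k) (h2 : k < l.length) :
    l.getD k ' ' < maxC l := by
  induction l generalizing k with
  | nil => simp at h2
  | cons x t ih =>
    cases t with
    | nil => simp [rmax] at h1 h2; omega
    | cons y t' =>
      rw [maxC_cons]
      simp only [rmax] at h1
      split at h1
      · rename_i hlt
        -- rightmost max is at 0; every later element is ≤ maxC tail < x
        obtain ⟨j, rfl⟩ : ∃ j, k = j + 1 := ⟨k - 1, by omega⟩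
        rw [List.getD_cons_succ]
        have hj : j < (y :: t').length := by simpa using h2
        have hmem : (y :: t').getD j ' ' ∈ (y :: t') := by
          rw [List.getD_eq_getElem _ _ hj]; exact List.getElem_mem hj
        calc (y :: t').getD j ' ' ≤ maxC (y :: t') := le_maxC _ _ hmem
          _ < x := hlt
          _ ≤ max x (maxC (y :: t')) := le_max_left _ _
      · rename_i hge
        obtain ⟨j, rfl⟩ : ∃ j, k = j + 1 := ⟨k - 1, by omega⟩
        rw [List.getD_cons_succ]
        have := ih j (by omega) (by simpa using h2)
        calc (y :: t').getD j ' ' < maxC (y :: t') := this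
          _ ≤ max x (maxC (y :: t')) := le_max_right _ _

theorem singleton_isPrefixOf (m : Char) (xs : List Char) :
    [m].isPrefixOf xs = true ↔ xs.head? = some m := by
  cases xs with
  | nil => simp [List.isPrefixOf]
  | cons y ys =>
    simp [List.isPrefixOf]
    exact eq_comm

theorem rfind_go_spec (l : List Char) (hl : l ≠ []) :
    ∀ c, rmax l ≤ c → PySem.Chars.rfind.go l [maxC l] c = (rmax l : Int) := by
  intro c
  induction c with
  | zero =>
    intro hc
    have h0 : rmax l = 0 := Nat.le_zero.mp hc
    rw [PySem.Chars.rfind.go.eq_1]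
    have hh : l.head? = some (maxC l) := by
      cases l with
      | nil => exact absurd rfl hl
      | cons x t =>
        have := getD_rmax (x :: t) hl
        rw [h0] at this
        simp only [List.getD_cons_zero] at this
        rw [List.head?_cons]
        exact congrArg some this
    rw [if_pos ((singleton_isPrefixOf _ _).mpr hh), h0]
    simp
  | succ j ih =>
    intro hc
    rw [PySem.Chars.rfind.go.eq_2]
    by_cases hej : rmax l = j + 1
    · have hlen : j + 1 < l.length := hej ▸ rmax_lt l hl
      have hh : (l.drop (j + 1)).head? = some (maxC l) := by
        rw [List.head?_drop, List.getElem?_eq_getElem hlen]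
        have := getD_rmax l hl
        rw [hej] at this
        rw [← this, List.getD_eq_getElem _ _ hlen]
      rw [if_pos ((singleton_isPrefixOf _ _).mpr hh), hej]
    · have hle : rmax l ≤ j := by omega
      have hh : ¬ ([maxC l].isPrefixOf (l.drop (j + 1)) = true) := by
        rw [singleton_isPrefixOf, List.head?_drop]
        by_cases hlen : j + 1 < l.length
        · rw [List.getElem?_eq_getElem hlen]
          have := getD_gt_rmax l (j + 1) (by omega) hlen
          rw [List.getD_eq_getElem _ _ hlen] at this
          simp only [Option.some.injEq]
          exact ne_of_lt this
        · rw [List.getElem?_eq_none (by omega)]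
          simp
      rw [if_neg hh]
      exact ih hle

theorem rfind_eq_rmax (l : List Char) (hl : l ≠ []) :
    PySem.Chars.rfind l [maxC l] = (rmax l : Int) := by
  unfold PySem.Chars.rfind
  exact rfind_go_spec l hl l.length (le_of_lt (rmax_lt l hl))

theorem getD_drop (s : List Char) (a k : Nat) (d : Char) (h : a + k < s.length) :
    (s.drop a).getD k d = s.getD (a + k) d := by
  have hk : k < (s.drop a).length := by simp; omega
  rw [List.getD_eq_getElem _ _ hk, List.getD_eq_getElem _ _ h]
  simp

theorem drop_cons (s : List Char) (m : Nat) (h : m < s.length) :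
    s.drop m = s.getD m ' ' :: s.drop (m + 1) := by
  rw [List.getD_eq_getElem _ _ h]
  exact List.drop_eq_getElem_cons h

-- value at the rightmost-suffix-max index = maximum of the suffix
theorem getD_fidx (s : List Char) (i : Nat) (h : i < s.length) :
    s.getD (fidx s i) ' ' = maxC (s.drop i) := by
  have hne : s.drop i ≠ [] := by
    intro he; have := congrArg List.length he; simp at this; omega
  have hr : rmax (s.drop i) < (s.drop i).length := rmax_lt _ hne
  have hlt : i + rmax (s.drop i) < s.length := by simp at hr; omega
  unfold fidx
  rw [← getD_drop s i _ ' ' hlt]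
  exact getD_rmax _ hne

theorem fidx_lt (s : List Char) (i : Nat) (h : i < s.length) : fidx s i < s.length := by
  have hne : s.drop i ≠ [] := by
    intro he; have := congrArg List.length he; simp at this; omega
  have hr := rmax_lt _ hne
  simp at hr
  unfold fidx; omega

-- the backward pass computes fidx at every position
theorem build_inv (s : List Char) :
    ∀ (k m : Nat), s.length = m + (k + 1) →
      (List.range' m (k + 1)).foldr
        (fun i acc =>
          let best := if s.getD acc.1 ' ' < s.getD i ' ' then i else acc.1
          (best, best :: acc.2)) (s.length - 1, ([] : List Nat))
      = (fidx s m, (List.range' m (k + 1)).map (fidx s)) := by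
  intro k
  induction k with
  | zero =>
    intro m hm
    have hm1 : m = s.length - 1 := by omega
    have hmlt : m < s.length := by omega
    have hdrop : (s.drop m).length = 1 := by simp; omega
    have hr0 : rmax (s.drop m) = 0 := by
      match he : s.drop m with
      | [] => rw [he] at hdrop; simp at hdrop
      | [a] => simp [rmax]
      | a :: b :: t => rw [he] at hdrop; simp at hdrop
    have hf : fidx s m = m := by unfold fidx; omega
    have hlm : s.length - 1 = m := by omega
    simp [List.range'_one, hlm, hf]
  | succ k ih =>
    intro m hm
    have hmlt : m < s.length := by omega
    have hstep : List.range' m (k + 1 + 1) = m :: List.range' (m + 1) (k + 1) :=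
      List.range'_succ
    rw [hstep, List.foldr_cons, ih (m + 1) (by omega), List.map_cons]
    have hval : s.getD (fidx s (m + 1)) ' ' = maxC (s.drop (m + 1)) :=
      getD_fidx s (m + 1) (by omega)
    have hne : s.drop (m + 1) ≠ [] := by
      intro he; have := congrArg List.length he; simp at this; omega
    have hdm : s.drop m = s.getD m ' ' :: s.drop (m + 1) := drop_cons s m hmlt
    have hbest : (if s.getD (fidx s (m + 1)) ' ' < s.getD m ' ' then m else fidx s (m + 1))
        = fidx s m := by
      rw [hval]
      match he : s.drop (m + 1) with
      | [] => exact absurd he hne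
      | y :: t' =>
        unfold fidx
        rw [hdm, he]
        simp only [rmax]
        split <;> omega
    simp only []
    rw [hbest]

-- the two forward scans agree
theorem loops_eq (S : String) (s : List Char) :
    ∀ (k i : Nat), s.length - i = k →
      LargestSwapLoop S s i = altFwd S s ((List.range' i k).map (fidx s)) i := by
  intro k
  induction k with
  | zero =>
    intro i hi
    rw [LargestSwapLoop]
    rw [dif_neg (by omega)]
    simp [altFwd]
  | succ k ih =>
    intro i hi
    have hilt : i < s.length := by omega
    have hne : s.drop i ≠ [] := by
      intro he; have := congrArg List.length he; simp at this; omega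
    have hstep : List.range' i (k + 1) = i :: List.range' (i + 1) k :=
      List.range'_succ
    rw [hstep, List.map_cons]
    -- unfold A's loop one step
    rw [LargestSwapLoop, dif_pos hilt]
    simp only []
    -- the max of the suffix
    have hmax : PySem.List.max? (s.drop i) (fun c => c) = some (maxC (s.drop i)) := by
      rw [drop_cons s i hilt]
      rw [PySem.List.max?_id_cons]
      rfl
    rw [hmax]
    simp only []
    -- the rfind index
    have hrf : PySem.Str.rfind (String.ofList (s.drop i)) (String.ofList [maxC (s.drop i)])
        = (rmax (s.drop i) : Int) := by
      rw [PySem.Str.rfind_eq]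
      simp only [String.toList_ofList]
      exact rfind_eq_rmax _ hne
    have hcondA : (s.getD i ' ' ≠ maxC (s.drop i)) ↔
        (s.getD i ' ' ≠ s.getD (fidx s i) ' ') := by
      rw [getD_fidx s i hilt]
    -- both branches
    by_cases hc : s.getD i ' ' ≠ maxC (s.drop i)
    · rw [if_pos hc]
      rw [altFwd, if_pos (hcondA.mp hc)]
      have hflt : fidx s i < s.length := fidx_lt s i hilt
      have hind : ((i : Int) + PySem.Str.rfind (String.ofList (s.drop i))
          (String.ofList [maxC (s.drop i)])) = ((fidx s i : Nat) : Int) := by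
        rw [hrf]; unfold fidx; push_cast; ring
      rw [hind]
      have hget1 : PySem.List.pyGetD s ((fidx s i : Nat) : Int) ' ' = s.getD (fidx s i) ' ' := by
        simp
      have hget2 : PySem.List.pyGetD s ((i : Nat) : Int) ' ' = s.getD i ' ' := by simp
      rw [hget1, hget2]
      have hset1 : PySem.List.pySetD s ((i : Nat) : Int) (s.getD (fidx s i) ' ')
          = s.set i (s.getD (fidx s i) ' ') := by
        simp [PySem.List.pySetD, PySem.List.pySet?, PySem.List.pyIdx?, hilt]
      rw [hset1]
      have hset2 : PySem.List.pySetD (s.set i (s.getD (fidx s i) ' ')) ((fidx s i : Nat) : Int)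
          (s.getD i ' ')
          = (s.set i (s.getD (fidx s i) ' ')).set (fidx s i) (s.getD i ' ') := by
        simp [PySem.List.pySetD, PySem.List.pySet?, PySem.List.pyIdx?, hflt]
      rw [hset2]
    · rw [if_neg hc]
      rw [altFwd, if_neg (fun h => hc (hcondA.mpr h))]
      exact ih (i + 1) (by omega)

-- ===== VERDICT (by name: the statement is the Claim_ definition above) =====
theorem LargestSwap_spec : Claim_equal_LargestSwap := by
  intro S _
  unfold Spec_LargestSwap LargestSwap LargestSwap_alt
  by_cases hn : S.toList.length = 0
  · rw [if_pos hn]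
    rw [LargestSwapLoop, dif_neg (by omega)]
  · rw [if_neg hn]
    simp only [List.range_eq_range']
    have hlen : S.toList.length - 1 + 1 = S.toList.length := by omega
    have hbuild := build_inv S.toList (S.toList.length - 1) 0 (by omega)
    rw [hlen] at hbuild
    rw [hbuild]
    exact loops_eq S S.toList S.toList.length 0 (by omega)
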